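-- pv_equiv track=rewrite | github.com/adnanyaqoobvirk/leetcode | 0484-find-permutation/0484-find-permutation.py | findPermutation
-- ===== SOURCE A (Python) =====
-- from typing import List
--
-- def findPermutation(s: str) -> List[int]:
--     ans = []
--     start = 1
--     count = 1
--     for c in s:
--         if c == "I":
--             for num in reversed(range(start, start + count)):
--                 ans.append(num)
--             start = start + count
--             count = 1
--         else:
--             count += 1
--     for num in reversed(range(start, start + count)):
--         ans.append(num)
--     return ans
-- ===== SOURCE B (Python) =====
-- from typing import List
--
-- def findPermutation(s: str) -> List[int]:
--     n = len(s)
--     res = []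
--     stack = []
--     for i in range(1, n + 2):
--         stack.append(i)
--         if i == n + 1 or s[i - 1] == "I":
--             while stack:
--                 res.append(stack.pop())
--     return res
-- ===== Notes on version B (the rewrite author's own statement) =====
-- stated objective: alternative
-- what changed: Replaces A's (start,count) run-length accumulator over characters with the classic explicit-stack scan: push 1..n+1 and flush the whole stack at each 'I' and at the end, so reversal of a 'D'-run comes from stack popping rather than a reversed range() emission.
import Mathlib
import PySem

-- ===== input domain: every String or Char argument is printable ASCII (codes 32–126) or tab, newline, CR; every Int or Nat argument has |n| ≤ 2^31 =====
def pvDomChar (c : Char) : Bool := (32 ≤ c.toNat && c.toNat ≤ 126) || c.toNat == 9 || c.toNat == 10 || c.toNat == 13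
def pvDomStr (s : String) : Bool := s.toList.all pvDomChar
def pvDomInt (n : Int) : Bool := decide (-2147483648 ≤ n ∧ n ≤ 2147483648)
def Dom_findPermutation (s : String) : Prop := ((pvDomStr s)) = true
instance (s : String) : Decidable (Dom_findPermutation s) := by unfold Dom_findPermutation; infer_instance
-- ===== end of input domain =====

-- B replaces A's (start, count) run-length accumulator with the classic explicit stack:
-- push 1..n+1, flush the whole stack (reversing the pending run) at each 'I' and at the end.
-- Objective: alternative decomposition; same O(n) cost.

-- ===== PORT A =====
def findPermutation (s : String) : List Int :=
  let st := s.toList.foldl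
    (fun (st : List Int × Int × Int) c =>
      let (ans, start, count) := st
      if c = 'I' then
        (((PySem.List.pyRange start (start + count) 1).reverse).foldl
            (fun a num => a ++ [num]) ans,
         start + count, 1)
      else
        (ans, start, count + 1)) ([], 1, 1)
  ((PySem.List.pyRange st.2.1 (st.2.1 + st.2.2) 1).reverse).foldl
    (fun a num => a ++ [num]) st.1

-- ===== PORT B =====
-- the `while stack: res.append(stack.pop())` loop (Python pops from the END of the list)
def popLoop : List Int → List Int → List Int
  | res, [] => res
  | res, x :: rest =>
      popLoop (res ++ [(x :: rest).getLast (List.cons_ne_nil x rest)]) (x :: rest).dropLast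
  termination_by _ st => st.length
  decreasing_by simp

def findPermutation_alt (s : String) : List Int :=
  let n : Int := PySem.Str.len s
  let st := (PySem.List.pyRange 1 (n + 2) 1).foldl
    (fun (st : List Int × List Int) i =>
      let (res, stack) := st
      let stack := stack ++ [i]
      if i = n + 1 || PySem.Str.pyGet? s (i - 1) = some 'I' then
        (popLoop res stack, [])
      else
        (res, stack)) ([], [])
  st.1

-- ===== PRECONDITION & SPEC =====
def Spec_findPermutation (s : String) (out : List Int) : Prop := out = findPermutation_alt s
instance (s : String) (out : List Int) : Decidable (Spec_findPermutation s out) := by unfold Spec_findPermutation; infer_instance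

-- ===== CLAIM (what is proved, stated in full; the proofs are below) =====
def Claim_equal_findPermutation : Prop := ∀ (s : String), Dom_findPermutation s → Spec_findPermutation s (findPermutation s)

-- ===== LEMMAS AND PROOFS =====

-- common functional characterisation: result of processing the remaining characters
-- given the pending run [start .. start+count-1]
def runSpec : List Char → Int → Int → List Int
  | [], start, count => (PySem.List.pyRange start (start + count) 1).reverse
  | c :: cs, start, count =>
      if c = 'I' then
        (PySem.List.pyRange start (start + count) 1).reverse ++ runSpec cs (start + count) 1
      else
        runSpec cs start (count + 1)

theorem popLoop_eq (res st : List Int) : popLoop res st = res ++ st.reverse := by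
  induction res, st using popLoop.induct with
  | case1 res => simp [popLoop]
  | case2 res x rest ih =>
      rw [popLoop, ih]
      conv_rhs => rw [← List.dropLast_append_getLast (List.cons_ne_nil x rest)]
      simp

theorem A_loop_eq (cs : List Char) : ∀ (ans : List Int) (start count : Int),
    (let st := cs.foldl
      (fun (st : List Int × Int × Int) c =>
        let (ans, start, count) := st
        if c = 'I' then
          (((PySem.List.pyRange start (start + count) 1).reverse).foldl
              (fun a num => a ++ [num]) ans,
           start + count, 1)
        else
          (ans, start, count + 1)) (ans, start, count)
     ((PySem.List.pyRange st.2.1 (st.2.1 + st.2.2) 1).reverse).foldl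
       (fun a num => a ++ [num]) st.1)
    = ans ++ runSpec cs start count := by
  induction cs with
  | nil =>
      intro ans start count
      simp only [List.foldl_nil, runSpec]
      exact PySem.List.foldl_append_singleton_eq_self _ _
  | cons c cs ih =>
      intro ans start count
      by_cases hc : c = 'I'
      · simp only [List.foldl_cons, hc, runSpec, if_true]
        rw [ih, PySem.List.foldl_append_singleton_eq_self]
        simp
      · simp only [List.foldl_cons, if_neg hc, runSpec]
        rw [ih]

theorem findPermutation_eq_runSpec (s : String) :
    findPermutation s = runSpec s.toList 1 1 := by
  have := A_loop_eq s.toList [] 1 1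
  simpa [findPermutation] using this

theorem B_loop_eq (s : String) : ∀ (m k : Nat), k + m = s.toList.length →
    ∀ (start : Int) (res : List Int), start ≤ (k : Int) + 1 →
    ((PySem.List.pyRange ((k : Int) + 1) ((s.toList.length : Int) + 2) 1).foldl
      (fun (st : List Int × List Int) i =>
        let (res, stack) := st
        let stack := stack ++ [i]
        if i = (s.toList.length : Int) + 1 || PySem.Str.pyGet? s (i - 1) = some 'I' then
          (popLoop res stack, [])
        else
          (res, stack)) (res, PySem.List.pyRange start ((k : Int) + 1) 1)).1
    = res ++ runSpec (s.toList.drop k) start ((k : Int) - start + 2) := by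
  intro m
  induction m with
  | zero =>
      intro k hk start res hstart
      have hkn : k = s.toList.length := by omega
      subst hkn
      set n : Int := (s.toList.length : Int) with hn
      rw [show PySem.List.pyRange (n + 1) (n + 2) 1
            = (n + 1) :: PySem.List.pyRange (n + 1 + 1) (n + 2) 1
          from PySem.List.pyRange_one_cons (by omega),
          show PySem.List.pyRange (n + 1 + 1) (n + 2) 1 = []
          from PySem.List.pyRange_one_eq_nil (by omega)]
      simp only [List.foldl_cons, List.foldl_nil]
      rw [if_pos (by simp), popLoop_eq,
          show PySem.List.pyRange start (n + 1) 1 ++ [n + 1]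
            = PySem.List.pyRange start (n + 1 + 1) 1
          from (PySem.List.pyRange_one_succ_right hstart).symm,
          List.drop_length]
      have h2 : start + (n - start + 2) = n + 1 + 1 := by ring
      simp only [runSpec]
      rw [h2]
  | succ m ih =>
      intro k hk start res hstart
      have hklt : k < s.toList.length := by omega
      set n : Int := (s.toList.length : Int) with hn
      have hkn : (k : Int) < n := by omega
      rw [show PySem.List.pyRange ((k : Int) + 1) (n + 2) 1
            = ((k : Int) + 1) :: PySem.List.pyRange ((k : Int) + 1 + 1) (n + 2) 1
          from PySem.List.pyRange_one_cons (by omega)]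
      simp only [List.foldl_cons]
      have hne : ¬ ((k : Int) + 1 = n + 1) := by omega
      have hstack : PySem.List.pyRange start ((k : Int) + 1) 1 ++ [(k : Int) + 1]
          = PySem.List.pyRange start ((k : Int) + 1 + 1) 1 :=
        (PySem.List.pyRange_one_succ_right hstart).symm
      have hdrop : s.toList.drop k = s.toList[k] :: s.toList.drop (k + 1) :=
        (List.getElem_cons_drop hklt).symm
      by_cases hc : s.toList[k] = 'I'
      · rw [if_pos (by simp [hne, hc, List.getElem?_eq_getElem hklt]), hstack, popLoop_eq]
        have := ih (k + 1) (by omega) ((k : Int) + 1 + 1)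
          (res ++ (PySem.List.pyRange start ((k : Int) + 1 + 1) 1).reverse) (by push_cast; omega)
        push_cast at this
        rw [show PySem.List.pyRange ((k : Int) + 1 + 1) ((k : Int) + 1 + 1) 1 = []
            from PySem.List.pyRange_one_eq_nil (le_refl _)] at this
        rw [this, hdrop]
        simp only [runSpec, if_pos hc]
        rw [show start + ((k : Int) - start + 2) = (k : Int) + 1 + 1 by ring,
            show (k : Int) + 1 - ((k : Int) + 1 + 1) + 2 = 1 by ring,
            List.append_assoc]
      · rw [if_neg (by simp [hne, hc, List.getElem?_eq_getElem hklt]), hstack]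
        have := ih (k + 1) (by omega) start res (by push_cast; omega)
        push_cast at this
        rw [this, hdrop]
        simp only [runSpec, if_neg hc]
        rw [show (k : Int) + 1 - start + 2 = (k : Int) - start + 2 + 1 by ring]

theorem findPermutation_alt_eq_runSpec (s : String) :
    findPermutation_alt s = runSpec s.toList 1 1 := by
  have h := B_loop_eq s s.toList.length 0 (by omega) 1 [] (by omega)
  rw [PySem.List.pyRange_one_eq_nil (by omega)] at h
  simp only [Nat.cast_zero, zero_add, List.drop_zero] at h
  have h1 : (0 : Int) - 1 + 2 = 1 := by ring
  rw [h1] at h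
  simpa [findPermutation_alt, PySem.Str.len_eq] using h

-- ===== VERDICT (by name: the statement is the Claim_ definition above) =====
theorem findPermutation_spec : Claim_equal_findPermutation := by
  intro s _
  unfold Spec_findPermutation
  rw [findPermutation_eq_runSpec, findPermutation_alt_eq_runSpec]
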